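-- pv_equiv track=rewrite | github.com/Jarde01/NEAT | main.py | calculate_num_excess_disjoint_genes
-- ===== SOURCE A (Python) =====
-- def calculate_num_excess_disjoint_genes(genome1: set, genome2: set):
--     disjoint = genome1.difference(genome2).union(genome2.difference(genome1))
--
--     disjoint_count = 0
--     excess_count = 0
--     for node_num in disjoint:
--         disjoint_count = disjoint_count + 1 if node_num in genome1 and min(genome2) < node_num < max(
--             genome2) else disjoint_count
--         disjoint_count = disjoint_count + 1 if node_num in genome2 and min(genome1) < node_num < max(
--             genome1) else disjoint_count
--         excess_count = excess_count + 1 if node_num in genome1 and min(genome2) > node_num or node_num > max(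
--             genome2) else excess_count
--         excess_count = excess_count + 1 if node_num in genome2 and min(genome1) > node_num or node_num > max(
--             genome1) else excess_count
--
--     return excess_count, disjoint_count
-- ===== SOURCE B (Python) =====
-- def _bisect_left(a, x):
--     lo, hi = 0, len(a)
--     while lo < hi:
--         mid = (lo + hi) // 2
--         if a[mid] < x:
--             lo = mid + 1
--         else:
--             hi = mid
--     return lo
--
--
-- def _bisect_right(a, x):
--     lo, hi = 0, len(a)
--     while lo < hi:
--         mid = (lo + hi) // 2
--         if a[mid] <= x:
--             lo = mid + 1
--         else:
--             hi = mid
--     return lo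
--
--
-- def calculate_num_excess_disjoint_genes(genome1: set, genome2: set):
--     only1 = sorted(genome1 - genome2)
--     only2 = sorted(genome2 - genome1)
--     excess = 0
--     disjoint = 0
--     if only1:
--         lo, hi = min(genome2), max(genome2)
--         inside = _bisect_left(only1, hi) - _bisect_right(only1, lo)
--         disjoint += inside
--         excess += len(only1) - inside
--     if only2:
--         lo, hi = min(genome1), max(genome1)
--         inside = _bisect_left(only2, hi) - _bisect_right(only2, lo)
--         disjoint += inside
--         excess += len(only2) - inside
--     return excess, disjoint
-- ===== Notes on version B (the rewrite author's own statement) =====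
-- stated objective: faster
-- what changed: B sorts each one-sided difference once and obtains both counts by rank arithmetic (two hand-written binary searches: #inside = bisect_left(only, max_other) - bisect_right(only, min_other), excess = len - inside), replacing A's loop over the symmetric difference whose four per-element conditionals re-test membership and recompute min/max of both genomes; Pre_ excludes the inputs where exactly one genome is empty, on which both A and B raise ValueError (min/max of an empty set).
import Mathlib
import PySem

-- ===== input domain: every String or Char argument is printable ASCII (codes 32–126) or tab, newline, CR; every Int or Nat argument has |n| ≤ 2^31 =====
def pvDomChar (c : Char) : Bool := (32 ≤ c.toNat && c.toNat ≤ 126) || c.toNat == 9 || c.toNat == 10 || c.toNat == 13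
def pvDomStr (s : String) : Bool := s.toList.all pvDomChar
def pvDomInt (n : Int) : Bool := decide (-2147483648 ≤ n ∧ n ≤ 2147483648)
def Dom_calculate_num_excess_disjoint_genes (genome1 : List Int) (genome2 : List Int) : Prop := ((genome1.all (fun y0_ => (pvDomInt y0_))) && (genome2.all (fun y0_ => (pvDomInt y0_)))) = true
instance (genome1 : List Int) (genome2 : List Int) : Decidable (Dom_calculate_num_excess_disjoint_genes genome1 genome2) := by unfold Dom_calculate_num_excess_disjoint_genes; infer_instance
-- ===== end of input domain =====

-- B sorts each one-sided difference and obtains both counts by rank arithmetic with two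
-- hand-written binary searches, instead of A's per-element classification loop that re-tests
-- membership and recomputes min/max of both genomes for every symmetric-difference gene.

-- ===== PORT A =====
-- Loop body of A: the four conditional-assignment lines, in source order.
-- min/max of the Python sets are taken over the argument lists (same elements, same value);
-- `min`/`max` of an empty set raise ValueError in Python — those inputs are excluded by
-- Pre_ below, so the `.getD 0` stand-in value is never what the claim is about.
def pvStepA (genome1 : List Int) (genome2 : List Int) (st : Int × Int) (node_num : Int) : Int × Int :=
  let mn2 := (PySem.List.min? genome2 (fun x => x)).getD 0
  let mx2 := (PySem.List.max? genome2 (fun x => x)).getD 0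
  let mn1 := (PySem.List.min? genome1 (fun x => x)).getD 0
  let mx1 := (PySem.List.max? genome1 (fun x => x)).getD 0
  let disjoint_count := if genome1.contains node_num ∧ mn2 < node_num ∧ node_num < mx2 then st.1 + 1 else st.1
  let disjoint_count := if genome2.contains node_num ∧ mn1 < node_num ∧ node_num < mx1 then disjoint_count + 1 else disjoint_count
  -- Python precedence: (node in g1 and min(g2) > node) or node > max(g2)
  let excess_count := if (genome1.contains node_num ∧ mn2 > node_num) ∨ node_num > mx2 then st.2 + 1 else st.2
  let excess_count := if (genome2.contains node_num ∧ mn1 > node_num) ∨ node_num > mx1 then excess_count + 1 else excess_count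
  (disjoint_count, excess_count)

def calculate_num_excess_disjoint_genes (genome1 : List Int) (genome2 : List Int) : Int × Int :=
  let genome1s : PySem.Set Int := PySem.Set.ofList genome1
  let genome2s : PySem.Set Int := PySem.Set.ofList genome2
  let disjoint : PySem.Set Int :=
    PySem.Set.union (PySem.Set.diff genome1s genome2s) (PySem.Set.diff genome2s genome1s)
  let r := disjoint.foldl (pvStepA genome1 genome2) (0, 0)
  (r.2, r.1)

-- ===== PORT B =====
-- Source B's _bisect_left: a hand-written binary search, ported by hand step for step.
-- The while loop runs at most hi - lo times (the interval shrinks every iteration),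
-- so it is transcribed with that explicit structural fuel; a[mid] is always in range
-- (0 ≤ lo ≤ mid < hi ≤ len(a)), so `.getD 0` is exact.
def pvBLGo (a : List Int) (x : Int) : Nat → Nat → Nat → Nat
  | 0, lo, _ => lo
  | fuel + 1, lo, hi =>
    if lo < hi then
      let mid := (lo + hi) / 2
      if a.getD mid 0 < x then pvBLGo a x fuel (mid + 1) hi
      else pvBLGo a x fuel lo mid
    else lo

def pvBL (a : List Int) (x : Int) (lo hi : Nat) : Nat := pvBLGo a x (hi - lo) lo hi

-- Source B's _bisect_right, same loop with `<=`.
def pvBRGo (a : List Int) (x : Int) : Nat → Nat → Nat → Nat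
  | 0, lo, _ => lo
  | fuel + 1, lo, hi =>
    if lo < hi then
      let mid := (lo + hi) / 2
      if a.getD mid 0 ≤ x then pvBRGo a x fuel (mid + 1) hi
      else pvBRGo a x fuel lo mid
    else lo

def pvBR (a : List Int) (x : Int) (lo hi : Nat) : Nat := pvBRGo a x (hi - lo) lo hi

def calculate_num_excess_disjoint_genes_alt (genome1 : List Int) (genome2 : List Int) : Int × Int :=
  let only1 := PySem.List.sorted (PySem.Set.diff (PySem.Set.ofList genome1) (PySem.Set.ofList genome2)) (fun x => x)
  let only2 := PySem.List.sorted (PySem.Set.diff (PySem.Set.ofList genome2) (PySem.Set.ofList genome1)) (fun x => x)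
  -- the two accumulators (excess, disjoint) of Source B, kept as one pair
  let ed : Int × Int := (0, 0)
  let ed : Int × Int :=
    if only1.isEmpty then ed
    else
      let lo := (PySem.List.min? genome2 (fun x => x)).getD 0
      let hi := (PySem.List.max? genome2 (fun x => x)).getD 0
      let inside : Int := (pvBL only1 hi 0 only1.length : Int) - (pvBR only1 lo 0 only1.length : Int)
      (ed.1 + ((only1.length : Int) - inside), ed.2 + inside)
  let ed : Int × Int :=
    if only2.isEmpty then ed
    else
      let lo := (PySem.List.min? genome1 (fun x => x)).getD 0
      let hi := (PySem.List.max? genome1 (fun x => x)).getD 0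
      let inside : Int := (pvBL only2 hi 0 only2.length : Int) - (pvBR only2 lo 0 only2.length : Int)
      (ed.1 + ((only2.length : Int) - inside), ed.2 + inside)
  ed

-- ===== PRECONDITION & SPEC =====
-- Pre_ excludes exactly the inputs where one genome is empty and the other is not:
-- there Python A raises ValueError (min/max of the empty set), and B raises too.
def Pre_calculate_num_excess_disjoint_genes (genome1 : List Int) (genome2 : List Int) : Prop :=
  genome1 = [] ↔ genome2 = []
instance (genome1 : List Int) (genome2 : List Int) : Decidable (Pre_calculate_num_excess_disjoint_genes genome1 genome2) := by unfold Pre_calculate_num_excess_disjoint_genes; infer_instance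
def pvWitness_calculate_num_excess_disjoint_genes : List Int × List Int := ([1, 2, 3, 6], [2, 3, 4])
def Spec_calculate_num_excess_disjoint_genes (genome1 : List Int) (genome2 : List Int) (out : Int × Int) : Prop := out = calculate_num_excess_disjoint_genes_alt genome1 genome2
instance (genome1 : List Int) (genome2 : List Int) (out : Int × Int) : Decidable (Spec_calculate_num_excess_disjoint_genes genome1 genome2 out) := by unfold Spec_calculate_num_excess_disjoint_genes; infer_instance

-- ===== CLAIM =====
def Claim_equal_calculate_num_excess_disjoint_genes : Prop := ∀ (genome1 : List Int) (genome2 : List Int), Dom_calculate_num_excess_disjoint_genes genome1 genome2 → Pre_calculate_num_excess_disjoint_genes genome1 genome2 → Spec_calculate_num_excess_disjoint_genes genome1 genome2 (calculate_num_excess_disjoint_genes genome1 genome2)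

-- ===== LEMMAS AND PROOFS =====

-- Per-element contribution of A's loop body to disjoint_count and excess_count.
def pvIndD (genome1 : List Int) (genome2 : List Int) (n : Int) : Int :=
  (if genome1.contains n ∧ (PySem.List.min? genome2 (fun x => x)).getD 0 < n ∧ n < (PySem.List.max? genome2 (fun x => x)).getD 0 then 1 else 0)
  + (if genome2.contains n ∧ (PySem.List.min? genome1 (fun x => x)).getD 0 < n ∧ n < (PySem.List.max? genome1 (fun x => x)).getD 0 then 1 else 0)

def pvIndE (genome1 : List Int) (genome2 : List Int) (n : Int) : Int :=
  (if (genome1.contains n ∧ (PySem.List.min? genome2 (fun x => x)).getD 0 > n) ∨ n > (PySem.List.max? genome2 (fun x => x)).getD 0 then 1 else 0)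
  + (if (genome2.contains n ∧ (PySem.List.min? genome1 (fun x => x)).getD 0 > n) ∨ n > (PySem.List.max? genome1 (fun x => x)).getD 0 then 1 else 0)

theorem pvStepA_eq (genome1 genome2 : List Int) (st : Int × Int) (n : Int) :
    pvStepA genome1 genome2 st n
      = (st.1 + pvIndD genome1 genome2 n, st.2 + pvIndE genome1 genome2 n) := by
  simp only [pvStepA, pvIndD, pvIndE]
  split_ifs <;> simp [Prod.ext_iff] <;> omega

theorem pvFoldA_char (genome1 genome2 : List Int) (l : List Int) (st : Int × Int) :
    l.foldl (pvStepA genome1 genome2) st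
      = (st.1 + (l.map (pvIndD genome1 genome2)).sum, st.2 + (l.map (pvIndE genome1 genome2)).sum) := by
  induction l generalizing st with
  | nil => simp
  | cons x t ih =>
    rw [List.foldl_cons, pvStepA_eq, ih]
    simp only [List.map_cons, List.sum_cons, Prod.mk.injEq]
    constructor <;> ring

theorem pvUnion_disjoint_append (s t : List Int)
    (ht : t.Nodup) (hdisj : ∀ x ∈ t, x ∉ s) :
    PySem.Set.union s t = s ++ t := by
  induction t generalizing s with
  | nil => simp [PySem.Set.union, PySem.Set.update]
  | cons x t ih =>
    have hxns : x ∉ s := hdisj x (by simp)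
    have hx : PySem.Set.add s x = s ++ [x] := by
      simp [PySem.Set.add, List.contains_eq_mem, hxns]
    have hstep : PySem.Set.union s (x :: t) = PySem.Set.union (s ++ [x]) t := by
      simp [PySem.Set.union, PySem.Set.update, List.foldl_cons, hx]
    rw [hstep, ih (s ++ [x])]
    · simp
    · exact ht.of_cons
    · intro y hy
      simp only [List.mem_append, List.mem_singleton]
      rintro (h | rfl)
      · exact hdisj y (by simp [hy]) h
      · exact (List.nodup_cons.mp ht).1 hy

-- A position lo such that everything before it satisfies p and nothing from it on
-- does is the count of p.
theorem pvCountP_char (a : List Int) (p : Int → Bool) (lo : Nat) (hlen : lo ≤ a.length)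
    (hLo : ∀ j, (hj : j < a.length) → j < lo → p a[j] = true)
    (hHi : ∀ j, (hj : j < a.length) → lo ≤ j → p a[j] = false) :
    lo = a.countP p := by
  have hsplit : a = a.take lo ++ a.drop lo := (List.take_append_drop lo a).symm
  rw [List.countP_eq_length_filter]
  conv_rhs => rw [hsplit]
  rw [List.filter_append]
  have h1 : (a.take lo).filter p = a.take lo := by
    apply List.filter_eq_self.mpr
    intro y hy
    obtain ⟨i, hi, rfl⟩ := List.mem_iff_getElem.mp hy
    rw [List.length_take] at hi
    have hia : i < a.length := by omega
    have : (a.take lo)[i] = a[i] := List.getElem_take ..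
    rw [this]
    exact hLo i hia (by omega)
  have h2 : (a.drop lo).filter p = [] := by
    apply List.filter_eq_nil_iff.mpr
    intro y hy
    obtain ⟨i, hi, rfl⟩ := List.mem_iff_getElem.mp hy
    rw [List.length_drop] at hi
    have hia : lo + i < a.length := by omega
    have : (a.drop lo)[i] = a[lo + i] := List.getElem_drop ..
    rw [this]
    simp [hHi (lo + i) hia (by omega)]
  rw [h1, h2, List.length_append, List.length_nil, List.length_take]
  omega

-- Invariant of Source B's _bisect_left on a non-decreasing list: it lands on the
-- number of elements < x.
theorem pvBLGo_inv (a : List Int) (x : Int) (hs : a.Pairwise (· ≤ ·)) :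
    ∀ fuel lo hi, hi - lo ≤ fuel → lo ≤ hi → hi ≤ a.length →
    (∀ j, (hj : j < a.length) → j < lo → a[j] < x) →
    (∀ j, (hj : j < a.length) → hi ≤ j → x ≤ a[j]) →
    pvBLGo a x fuel lo hi = a.countP (fun n => decide (n < x)) := by
  intro fuel
  induction fuel with
  | zero =>
    intro lo hi hf hlh hlen hLo hHi
    have heq : lo = hi := by omega
    subst heq
    exact pvCountP_char a _ lo hlen (fun j hj h => decide_eq_true (hLo j hj h))
      (fun j hj h => decide_eq_false (not_lt.mpr (hHi j hj h)))
  | succ fuel ih =>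
    intro lo hi hf hlh hlen hLo hHi
    rw [pvBLGo]
    by_cases h : lo < hi
    · simp only [h, if_true]
      have hmidlt : (lo + hi) / 2 < hi := by omega
      have hmidge : lo ≤ (lo + hi) / 2 := by omega
      have hmida : (lo + hi) / 2 < a.length := by omega
      have hgetD : a.getD ((lo + hi) / 2) 0 = a[(lo + hi) / 2] := List.getD_eq_getElem a 0 hmida
      have hmono := List.pairwise_iff_getElem.mp hs
      by_cases hc : a.getD ((lo + hi) / 2) 0 < x
      · simp only [hc, if_true]
        apply ih ((lo + hi) / 2 + 1) hi (by omega) (by omega) hlen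
        · intro j hj hjlt
          rcases Nat.lt_or_ge j ((lo + hi) / 2) with hj' | hj'
          · calc a[j] ≤ a[(lo + hi) / 2] := hmono j ((lo + hi) / 2) hj hmida hj'
              _ < x := by rw [← hgetD]; exact hc
          · have : j = (lo + hi) / 2 := by omega
            subst this; rw [← hgetD]; exact hc
        · exact hHi
      · simp only [hc, if_false]
        apply ih lo ((lo + hi) / 2) (by omega) (by omega) (by omega) hLo
        intro j hj hjge
        rw [not_lt, hgetD] at hc
        rcases Nat.lt_or_ge ((lo + hi) / 2) j with hj' | hj'
        · calc x ≤ a[(lo + hi) / 2] := hc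
            _ ≤ a[j] := hmono ((lo + hi) / 2) j hmida hj hj'
        · have : j = (lo + hi) / 2 := by omega
          subst this; exact hc
    · simp only [h, if_false]
      have heq : lo = hi := by omega
      exact pvCountP_char a _ lo (heq ▸ hlen) (fun j hj hlt => decide_eq_true (hLo j hj hlt))
        (fun j hj hge => decide_eq_false (not_lt.mpr (hHi j hj (heq ▸ hge))))

theorem pvBL_count (a : List Int) (x : Int) (hs : a.Pairwise (· ≤ ·)) :
    pvBL a x 0 a.length = a.countP (fun n => decide (n < x)) :=
  pvBLGo_inv a x hs (a.length - 0) 0 a.length (by omega) (by omega) (le_refl _)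
    (fun j _ hj => absurd hj (by omega)) (fun j hj hge => absurd hj (by omega))

-- Same invariant for _bisect_right (count of elements ≤ x).
theorem pvBRGo_inv (a : List Int) (x : Int) (hs : a.Pairwise (· ≤ ·)) :
    ∀ fuel lo hi, hi - lo ≤ fuel → lo ≤ hi → hi ≤ a.length →
    (∀ j, (hj : j < a.length) → j < lo → a[j] ≤ x) →
    (∀ j, (hj : j < a.length) → hi ≤ j → x < a[j]) →
    pvBRGo a x fuel lo hi = a.countP (fun n => decide (n ≤ x)) := by
  intro fuel
  induction fuel with
  | zero =>
    intro lo hi hf hlh hlen hLo hHi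
    have heq : lo = hi := by omega
    subst heq
    exact pvCountP_char a _ lo hlen (fun j hj h => decide_eq_true (hLo j hj h))
      (fun j hj h => decide_eq_false (not_le.mpr (hHi j hj h)))
  | succ fuel ih =>
    intro lo hi hf hlh hlen hLo hHi
    rw [pvBRGo]
    by_cases h : lo < hi
    · simp only [h, if_true]
      have hmidlt : (lo + hi) / 2 < hi := by omega
      have hmidge : lo ≤ (lo + hi) / 2 := by omega
      have hmida : (lo + hi) / 2 < a.length := by omega
      have hgetD : a.getD ((lo + hi) / 2) 0 = a[(lo + hi) / 2] := List.getD_eq_getElem a 0 hmida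
      have hmono := List.pairwise_iff_getElem.mp hs
      by_cases hc : a.getD ((lo + hi) / 2) 0 ≤ x
      · simp only [hc, if_true]
        apply ih ((lo + hi) / 2 + 1) hi (by omega) (by omega) hlen
        · intro j hj hjlt
          rcases Nat.lt_or_ge j ((lo + hi) / 2) with hj' | hj'
          · calc a[j] ≤ a[(lo + hi) / 2] := hmono j ((lo + hi) / 2) hj hmida hj'
              _ ≤ x := by rw [← hgetD]; exact hc
          · have : j = (lo + hi) / 2 := by omega
            subst this; rw [← hgetD]; exact hc
        · exact hHi
      · simp only [hc, if_false]
        apply ih lo ((lo + hi) / 2) (by omega) (by omega) (by omega) hLo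
        intro j hj hjge
        rw [not_le, hgetD] at hc
        rcases Nat.lt_or_ge ((lo + hi) / 2) j with hj' | hj'
        · calc x < a[(lo + hi) / 2] := hc
            _ ≤ a[j] := hmono ((lo + hi) / 2) j hmida hj hj'
        · have : j = (lo + hi) / 2 := by omega
          subst this; exact hc
    · simp only [h, if_false]
      have heq : lo = hi := by omega
      exact pvCountP_char a _ lo (heq ▸ hlen) (fun j hj hlt => decide_eq_true (hLo j hj hlt))
        (fun j hj hge => decide_eq_false (not_le.mpr (hHi j hj (heq ▸ hge))))

theorem pvBR_count (a : List Int) (x : Int) (hs : a.Pairwise (· ≤ ·)) :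
    pvBR a x 0 a.length = a.countP (fun n => decide (n ≤ x)) :=
  pvBRGo_inv a x hs (a.length - 0) 0 a.length (by omega) (by omega) (le_refl _)
    (fun j _ hj => absurd hj (by omega)) (fun j hj hge => absurd hj (by omega))

-- Rank arithmetic: if p2 implies p1 and p3 is exactly "p1 but not p2",
-- then #p1 - #p2 = #p3.
theorem pvCountSub (l : List Int) (p1 p2 p3 : Int → Bool)
    (h : ∀ n ∈ l, (p3 n = true ↔ (p1 n = true ∧ ¬ p2 n = true)) ∧ (p2 n = true → p1 n = true)) :
    (l.countP p1 : Int) - (l.countP p2 : Int) = (l.countP p3 : Int) := by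
  induction l with
  | nil => simp
  | cons a t ih =>
    have ht := ih (fun n hn => h n (by simp [hn]))
    obtain ⟨hiff, himp⟩ := h a (by simp)
    simp only [List.countP_cons]
    by_cases hp1 : p1 a = true <;> by_cases hp2 : p2 a = true
    · have hp3 : p3 a = false := Bool.not_eq_true _ ▸ (fun hp => (hiff.mp hp).2 hp2)
      simp only [hp1, hp2, hp3, if_true, Bool.false_eq_true, if_false]
      push_cast
      omega
    · have hp3 : p3 a = true := hiff.mpr ⟨hp1, hp2⟩
      simp only [Bool.not_eq_true] at hp2
      simp only [hp1, hp2, hp3, if_true, if_false]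
      push_cast
      omega
    · exact absurd (himp hp2) hp1
    · have hp3 : ¬ p3 a = true := fun hp => hp1 (hiff.mp hp).1
      simp only [Bool.not_eq_true] at hp1 hp2 hp3
      simp only [hp1, hp2, hp3, if_false]
      push_cast
      omega

-- Sum of a 0/1 Prop-indicator as a count.
theorem pvSumIte (l : List Int) (p : Int → Prop) [DecidablePred p] :
    (l.map (fun n => if p n then (1 : Int) else 0)).sum = (l.countP (fun n => decide (p n)) : Int) := by
  induction l with
  | nil => simp
  | cons a t ih =>
    simp only [List.map_cons, List.sum_cons, List.countP_cons, ih]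
    by_cases h : p a <;> simp [h] <;> push_cast <;> omega

theorem pvSumIteNeg (l : List Int) (p : Int → Prop) [DecidablePred p] :
    (l.map (fun n => if p n then (0 : Int) else 1)).sum
      = (l.length : Int) - (l.countP (fun n => decide (p n)) : Int) := by
  induction l with
  | nil => simp
  | cons a t ih =>
    simp only [List.map_cons, List.sum_cons, List.countP_cons, List.length_cons, ih]
    have hle := List.countP_le_length (p := fun n => decide (p n)) (l := t)
    by_cases h : p a <;> simp [h] <;> push_cast <;> omega

-- ===== VERDICT (by name: the statement is the Claim_ definition above) =====
set_option maxHeartbeats 1600000 in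
theorem calculate_num_excess_disjoint_genes_spec : Claim_equal_calculate_num_excess_disjoint_genes := by
  intro genome1 genome2 _hdom hpre
  unfold Spec_calculate_num_excess_disjoint_genes
  by_cases h1 : genome1 = []
  · have h2 : genome2 = [] := (hpre.mp h1)
    subst h1; subst h2; rfl
  · have h2 : genome2 ≠ [] := fun h => h1 (hpre.mpr h)
    -- extremal elements of both genomes
    obtain ⟨m1, hm1⟩ : ∃ m, PySem.List.min? genome1 (fun x => x) = some m := by
      cases hv : PySem.List.min? genome1 (fun x => x) with
      | none => exact absurd ((PySem.List.min?_eq_none_iff _ _).mp hv) h1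
      | some m => exact ⟨m, rfl⟩
    obtain ⟨M1, hM1⟩ : ∃ m, PySem.List.max? genome1 (fun x => x) = some m := by
      cases hv : PySem.List.max? genome1 (fun x => x) with
      | none => exact absurd ((PySem.List.max?_eq_none_iff _ _).mp hv) h1
      | some m => exact ⟨m, rfl⟩
    obtain ⟨m2, hm2⟩ : ∃ m, PySem.List.min? genome2 (fun x => x) = some m := by
      cases hv : PySem.List.min? genome2 (fun x => x) with
      | none => exact absurd ((PySem.List.min?_eq_none_iff _ _).mp hv) h2
      | some m => exact ⟨m, rfl⟩
    obtain ⟨M2, hM2⟩ : ∃ m, PySem.List.max? genome2 (fun x => x) = some m := by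
      cases hv : PySem.List.max? genome2 (fun x => x) with
      | none => exact absurd ((PySem.List.max?_eq_none_iff _ _).mp hv) h2
      | some m => exact ⟨m, rfl⟩
    have hm1mem := PySem.List.min?_mem hm1
    have hM1mem := PySem.List.max?_mem hM1
    have hm2mem := PySem.List.min?_mem hm2
    have hM2mem := PySem.List.max?_mem hM2
    have hm1min : ∀ y ∈ genome1, m1 ≤ y := PySem.List.min?_isMin hm1
    have hM1max : ∀ y ∈ genome1, y ≤ M1 := PySem.List.max?_isMax hM1
    have hm2min : ∀ y ∈ genome2, m2 ≤ y := PySem.List.min?_isMin hm2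
    have hM2max : ∀ y ∈ genome2, y ≤ M2 := PySem.List.max?_isMax hM2
    set D1 : List Int := PySem.Set.diff (PySem.Set.ofList genome1) (PySem.Set.ofList genome2) with hD1
    set D2 : List Int := PySem.Set.diff (PySem.Set.ofList genome2) (PySem.Set.ofList genome1) with hD2
    have hD1mem : ∀ x ∈ D1, x ∈ genome1 ∧ x ∉ genome2 := by
      intro x hx
      rw [hD1, PySem.Set.mem_diff] at hx
      exact ⟨(PySem.Set.mem_ofList _ _).mp hx.1, fun h => hx.2 ((PySem.Set.mem_ofList _ _).mpr h)⟩
    have hD2mem : ∀ x ∈ D2, x ∈ genome2 ∧ x ∉ genome1 := by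
      intro x hx
      rw [hD2, PySem.Set.mem_diff] at hx
      exact ⟨(PySem.Set.mem_ofList _ _).mp hx.1, fun h => hx.2 ((PySem.Set.mem_ofList _ _).mpr h)⟩
    have hunion : PySem.Set.union D1 D2 = D1 ++ D2 :=
      pvUnion_disjoint_append D1 D2
        (PySem.Set.nodup_diff _ _ (PySem.Set.nodup_ofList genome2))
        (fun x hx hx1 => (hD2mem x hx).2 (hD1mem x hx1).1)
    -- pointwise agreement of A's indicators on each half
    have hE1 : D1.map (pvIndE genome1 genome2)
        = D1.map (fun n => if m2 < n ∧ n < M2 then (0 : Int) else 1) := by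
      apply List.map_congr_left
      intro n hn
      obtain ⟨hn1, hn2⟩ := hD1mem n hn
      have hneqm : n ≠ m2 := fun h => hn2 (h ▸ hm2mem)
      have hneqM : n ≠ M2 := fun h => hn2 (h ▸ hM2mem)
      have hle : n ≤ M1 := hM1max n hn1
      simp only [pvIndE, hm1, hM1, hm2, hM2, Option.getD_some,
        List.contains_eq_mem, decide_eq_true_eq, hn1, hn2, true_and, false_and, false_or]
      split_ifs <;> omega
    have hdD1 : D1.map (pvIndD genome1 genome2)
        = D1.map (fun n => if m2 < n ∧ n < M2 then (1 : Int) else 0) := by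
      apply List.map_congr_left
      intro n hn
      obtain ⟨hn1, hn2⟩ := hD1mem n hn
      simp only [pvIndD, hm1, hM1, hm2, hM2, Option.getD_some,
        List.contains_eq_mem, decide_eq_true_eq, hn1, hn2, true_and, false_and, if_false]
      split_ifs <;> omega
    have hE2 : D2.map (pvIndE genome1 genome2)
        = D2.map (fun n => if m1 < n ∧ n < M1 then (0 : Int) else 1) := by
      apply List.map_congr_left
      intro n hn
      obtain ⟨hn2, hn1⟩ := hD2mem n hn
      have hneqm : n ≠ m1 := fun h => hn1 (h ▸ hm1mem)
      have hneqM : n ≠ M1 := fun h => hn1 (h ▸ hM1mem)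
      have hle : n ≤ M2 := hM2max n hn2
      simp only [pvIndE, hm1, hM1, hm2, hM2, Option.getD_some,
        List.contains_eq_mem, decide_eq_true_eq, hn1, hn2, true_and, false_and, false_or]
      split_ifs <;> omega
    have hdD2 : D2.map (pvIndD genome1 genome2)
        = D2.map (fun n => if m1 < n ∧ n < M1 then (1 : Int) else 0) := by
      apply List.map_congr_left
      intro n hn
      obtain ⟨hn2, hn1⟩ := hD2mem n hn
      simp only [pvIndD, hm1, hM1, hm2, hM2, Option.getD_some,
        List.contains_eq_mem, decide_eq_true_eq, hn1, hn2, true_and, false_and, if_false]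
      split_ifs <;> omega
    -- sums of the indicators as counts
    have hc1e := pvSumIteNeg D1 (fun n => m2 < n ∧ n < M2)
    have hc1d := pvSumIte D1 (fun n => m2 < n ∧ n < M2)
    have hc2e := pvSumIteNeg D2 (fun n => m1 < n ∧ n < M1)
    have hc2d := pvSumIte D2 (fun n => m1 < n ∧ n < M1)
    -- the B side: sorted halves, binary searches, rank arithmetic
    set only1 : List Int := PySem.List.sorted D1 (fun x => x) with honly1
    set only2 : List Int := PySem.List.sorted D2 (fun x => x) with honly2
    have hperm1 : only1.Perm D1 := PySem.List.sorted_perm D1 (fun x => x) false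
    have hperm2 : only2.Perm D2 := PySem.List.sorted_perm D2 (fun x => x) false
    have hpair1 : only1.Pairwise (· ≤ ·) := PySem.List.sorted_pairwise D1 (fun x => x)
    have hpair2 : only2.Pairwise (· ≤ ·) := PySem.List.sorted_pairwise D2 (fun x => x)
    have hm2M2 : m2 ≤ M2 := hm2min M2 hM2mem
    have hm1M1 : m1 ≤ M1 := hm1min M1 hM1mem
    have hc1 : (pvBL only1 M2 0 only1.length : Int) - (pvBR only1 m2 0 only1.length : Int)
        = (D1.countP (fun n => decide (m2 < n ∧ n < M2)) : Int) := by
      rw [pvBL_count only1 M2 hpair1, pvBR_count only1 m2 hpair1,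
        pvCountSub only1 (fun n => decide (n < M2)) (fun n => decide (n ≤ m2))
          (fun n => decide (m2 < n ∧ n < M2)) ?_, hperm1.countP_eq]
      intro n hn
      have hn2 := (hD1mem n (hperm1.mem_iff.mp hn)).2
      have hne1 : n ≠ m2 := fun h => hn2 (h ▸ hm2mem)
      have hne2 : n ≠ M2 := fun h => hn2 (h ▸ hM2mem)
      simp only [decide_eq_true_eq]
      constructor
      · constructor
        · rintro ⟨ha, hb⟩; exact ⟨hb, by omega⟩
        · rintro ⟨ha, hb⟩
          constructor <;> omega
      · intro hle
        have : n < m2 := lt_of_le_of_ne hle hne1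
        omega
    have hc2 : (pvBL only2 M1 0 only2.length : Int) - (pvBR only2 m1 0 only2.length : Int)
        = (D2.countP (fun n => decide (m1 < n ∧ n < M1)) : Int) := by
      rw [pvBL_count only2 M1 hpair2, pvBR_count only2 m1 hpair2,
        pvCountSub only2 (fun n => decide (n < M1)) (fun n => decide (n ≤ m1))
          (fun n => decide (m1 < n ∧ n < M1)) ?_, hperm2.countP_eq]
      intro n hn
      have hn1 := (hD2mem n (hperm2.mem_iff.mp hn)).2
      have hne1 : n ≠ m1 := fun h => hn1 (h ▸ hm1mem)
      have hne2 : n ≠ M1 := fun h => hn1 (h ▸ hM1mem)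
      simp only [decide_eq_true_eq]
      constructor
      · constructor
        · rintro ⟨ha, hb⟩; exact ⟨hb, by omega⟩
        · rintro ⟨ha, hb⟩
          constructor <;> omega
      · intro hle
        have : n < m1 := lt_of_le_of_ne hle hne1
        omega
    have hlen1 : only1.length = D1.length := hperm1.length_eq
    have hlen2 : only2.length = D2.length := hperm2.length_eq
    -- closed forms of both sides
    have hA : calculate_num_excess_disjoint_genes genome1 genome2
        = ((D1.length : Int) - (D1.countP (fun n => decide (m2 < n ∧ n < M2)) : Int)
            + ((D2.length : Int) - (D2.countP (fun n => decide (m1 < n ∧ n < M1)) : Int)),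
           (D1.countP (fun n => decide (m2 < n ∧ n < M2)) : Int)
            + (D2.countP (fun n => decide (m1 < n ∧ n < M1)) : Int)) := by
      unfold calculate_num_excess_disjoint_genes
      simp only [← hD1, ← hD2, hunion, pvFoldA_char, List.map_append, List.sum_append,
        hE1, hdD1, hE2, hdD2, hc1e, hc1d, hc2e, hc2d, zero_add]
    have hB : calculate_num_excess_disjoint_genes_alt genome1 genome2
        = ((D1.length : Int) - (D1.countP (fun n => decide (m2 < n ∧ n < M2)) : Int)
            + ((D2.length : Int) - (D2.countP (fun n => decide (m1 < n ∧ n < M1)) : Int)),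
           (D1.countP (fun n => decide (m2 < n ∧ n < M2)) : Int)
            + (D2.countP (fun n => decide (m1 < n ∧ n < M1)) : Int)) := by
      unfold calculate_num_excess_disjoint_genes_alt
      simp only [← hD1, ← hD2, ← honly1, ← honly2, hm1, hM1, hm2, hM2, Option.getD_some]
      by_cases hemp1 : only1.isEmpty <;> by_cases hemp2 : only2.isEmpty <;>
        simp only [hemp1, hemp2, if_true, if_false]
      · -- both empty
        have hn1 : D1 = [] := by
          have h := hperm1
          rw [List.isEmpty_iff.mp hemp1] at h
          exact (List.Perm.nil_eq h).symm
        have hn2 : D2 = [] := by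
          have h := hperm2
          rw [List.isEmpty_iff.mp hemp2] at h
          exact (List.Perm.nil_eq h).symm
        simp [hn1, hn2]
      · -- only1 empty, only2 not
        have hn1 : D1 = [] := by
          have h := hperm1
          rw [List.isEmpty_iff.mp hemp1] at h
          exact (List.Perm.nil_eq h).symm
        rw [hc2, hlen2]
        simp [hn1]
      · -- only2 empty, only1 not
        have hn2 : D2 = [] := by
          have h := hperm2
          rw [List.isEmpty_iff.mp hemp2] at h
          exact (List.Perm.nil_eq h).symm
        rw [hc1, hlen1]
        simp [hn2]
      · rw [hc1, hc2, hlen1, hlen2]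
        refine Prod.ext ?_ ?_ <;> simp
    rw [hA, hB]
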